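-- pv_equiv track=rewrite | github.com/zthurman/fizzpy | Python/cheese.py | stringjumbler
-- ===== SOURCE A (Python) =====
-- def stringjumbler(s):
--     alphabet = ['a', 'b', 'c', 'd', 'e', 'f', 'g', 'h', 'i', 'j', 'k', 'l', 'm', 'n', 'o',
--                 'p', 'q', 'r', 's', 't', 'u', 'v', 'w', 'x', 'y', 'z']
--     upperalphabet = [x.upper() for x in alphabet]
--     reversedalphabet = alphabet[::-1]
--     symbol = "~`!@#$%^&*()_-+={}[]:>;',</?*-+"
--     numbers = "0123456789"
--     space = " "
--     reversed_s = ""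
--     for i in s:
--         case = i.islower()
--         if case:
--             if i in reversedalphabet:
--                 index = alphabet.index(i)
--                 newletter = reversedalphabet[index]
--                 reversed_s += newletter
--         elif not case:
--             if i in upperalphabet:
--                 reversed_s += i
--             elif i in symbol:
--                 reversed_s += i
--             elif i == space:
--                 reversed_s += i
--             elif i == "\\":
--                 reversed_s += i
--             elif i in numbers:
--                 reversed_s += i
--     return reversed_s
-- ===== SOURCE B (Python) =====
-- _SYM = "~`!@#$%^&*()_-+={}[]:>;',</?*-+ \\"
--
-- def _one(c):
--     o = ord(c)
--     if 97 <= o <= 122: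
--         return chr(219 - o)
--     if 65 <= o <= 90 or 48 <= o <= 57 or c in _SYM:
--         return c
--     return ""
--
-- def stringjumbler(s):
--     # Divide and conquer: split the string in half, jumble each half, concatenate;
--     # a one-character string is classified arithmetically (no lists, no .index).
--     if len(s) <= 1:
--         return _one(s) if s else ""
--     m = len(s) // 2
--     return stringjumbler(s[:m]) + stringjumbler(s[m:])
-- ===== Notes on version B (the rewrite author's own statement) =====
-- stated objective: alternative
-- what changed: Replaces A's left-to-right loop with its islower/branch cascade and alphabet.index list scans by a divide-and-conquer recursion (jumble each half of the string and concatenate) whose base case classifies a single character purely arithmetically on its code point (atbash = chr(219-ord(c))), with no alphabet lists and no .index.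
import Mathlib
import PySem

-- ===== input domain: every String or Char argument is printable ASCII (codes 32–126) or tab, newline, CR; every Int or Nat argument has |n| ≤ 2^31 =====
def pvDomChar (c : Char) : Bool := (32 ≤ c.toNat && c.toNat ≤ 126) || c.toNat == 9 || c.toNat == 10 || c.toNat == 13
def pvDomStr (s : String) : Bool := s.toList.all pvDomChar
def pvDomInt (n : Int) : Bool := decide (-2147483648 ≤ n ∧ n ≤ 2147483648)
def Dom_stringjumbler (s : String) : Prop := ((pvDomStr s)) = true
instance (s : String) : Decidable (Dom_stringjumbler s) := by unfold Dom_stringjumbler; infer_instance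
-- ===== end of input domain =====

-- B replaces A's branch-cascade loop (with alphabet.index scans) by a divide-and-conquer
-- recursion on string halves whose base case classifies a character arithmetically (alternative).


-- ===== PORT A =====
def aAlphabet : List Char :=
  ['a','b','c','d','e','f','g','h','i','j','k','l','m','n','o',
   'p','q','r','s','t','u','v','w','x','y','z']
def aUpperalphabet : List Char := aAlphabet.map PySem.Chars.upperChar  -- [x.upper() for x in alphabet]
def aReversedalphabet : List Char := aAlphabet.reverse                 -- alphabet[::-1]
def aSymbol : List Char := "~`!@#$%^&*()_-+={}[]:>;',</?*-+".toList
def aNumbers : List Char := "0123456789".toList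

-- one iteration of A's `for i in s` loop (the branch cascade, in order)
def aStep (acc : List Char) (i : Char) : List Char :=
  let case := PySem.Chars.islower i
  if case then
    if i ∈ aReversedalphabet then
      match PySem.List.index? aAlphabet i with
      | some index => acc ++ [aReversedalphabet.getD index ' ']  -- index in range by the membership guard
      | none => acc                                              -- unreachable (i ∈ reversedalphabet)
    else acc
  else
    if i ∈ aUpperalphabet then acc ++ [i]
    else if i ∈ aSymbol then acc ++ [i]
    else if i = ' ' then acc ++ [i]
    else if i = '\\' then acc ++ [i]
    else if i ∈ aNumbers then acc ++ [i]
    else acc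

def stringjumbler (s : String) : String :=
  String.ofList (s.toList.foldl aStep [])

-- ===== PORT B =====
def bSym : List Char := "~`!@#$%^&*()_-+={}[]:>;',</?*-+ \\".toList

-- B's `_one`: arithmetic classification of a single character
def bOne (c : Char) : List Char :=
  let o := c.toNat
  if 97 ≤ o ∧ o ≤ 122 then [Char.ofNat (219 - o)]
  else if (65 ≤ o ∧ o ≤ 90) ∨ (48 ≤ o ∧ o ≤ 57) ∨ c ∈ bSym then [c]
  else []

-- B's divide-and-conquer recursion on the string's characters
def bGo : List Char → List Char
  | [] => []
  | [c] => bOne c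
  | a :: b :: rest =>
      let m := (a :: b :: rest).length / 2
      bGo ((a :: b :: rest).take m) ++ bGo ((a :: b :: rest).drop m)
termination_by l => l.length
decreasing_by
  · simp; omega
  · simp; omega

def stringjumbler_alt (s : String) : String := String.ofList (bGo s.toList)

-- ===== PRECONDITION & SPEC =====
def Spec_stringjumbler (s : String) (out : String) : Prop := out = stringjumbler_alt s
instance (s : String) (out : String) : Decidable (Spec_stringjumbler s out) := by unfold Spec_stringjumbler; infer_instance

-- ===== CLAIM (what is proved, stated in full; the proofs are below) =====
def Claim_equal_stringjumbler : Prop := ∀ (s : String), Dom_stringjumbler s → Spec_stringjumbler s (stringjumbler s)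

-- ===== LEMMAS AND PROOFS =====

-- B's divide-and-conquer computes the concatenation of the per-character pieces
theorem bGo_eq_flatMap : ∀ (l : List Char), bGo l = l.flatMap bOne := by
  intro l
  induction l using bGo.induct with
  | case1 => simp [bGo]
  | case2 c => simp [bGo]
  | case3 a b rest m ih1 ih2 =>
      rw [bGo, ih1, ih2, ← List.flatMap_append, List.take_append_drop]

-- A's step appends a per-character piece
theorem aStep_factor (acc : List Char) (c : Char) : aStep acc c = acc ++ aStep [] c := by
  unfold aStep
  cases PySem.List.index? aAlphabet c <;> split_ifs <;> simp <;> split <;> simp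

-- on every 7-bit character A's per-character piece equals B's
set_option maxRecDepth 8192 in
theorem piece_eq : ∀ (n : Fin 128), aStep [] (Char.ofNat n.val) = bOne (Char.ofNat n.val) := by
  decide

theorem piece_eq' (c : Char) (h : pvDomChar c = true) : aStep [] c = bOne c := by
  have hlt : c.toNat < 128 := by
    simp only [pvDomChar, Bool.or_eq_true, Bool.and_eq_true, decide_eq_true_eq,
      beq_iff_eq] at h
    omega
  have hc : Char.ofNat c.toNat = c := Char.ofNat_toNat c
  simpa [hc] using piece_eq ⟨c.toNat, hlt⟩

theorem foldl_aStep (l : List Char) (h : ∀ c ∈ l, pvDomChar c = true) :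
    l.foldl aStep [] = l.flatMap bOne := by
  have hstep : aStep = fun acc c => acc ++ aStep [] c := funext₂ aStep_factor
  rw [hstep, PySem.List.foldl_append_eq_flatMap (fun c => aStep [] c) l [], List.nil_append]
  exact List.flatMap_congr (fun c hc => piece_eq' c (h c hc))

-- ===== VERDICT (by name: the statement is the Claim_ definition above) =====
theorem stringjumbler_spec : Claim_equal_stringjumbler := by
  intro s hs
  unfold Spec_stringjumbler stringjumbler stringjumbler_alt
  rw [foldl_aStep, bGo_eq_flatMap]
  intro c hc
  exact List.all_eq_true.mp hs c hc
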